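-- pv_equiv track=rewrite | github.com/varvarkins/varvarkins_leetcode | remove_spaces_around.py | remove_spaces_around
-- ===== SOURCE A (Python) =====
-- def remove_spaces_around(s : str):
--     s = list(s)
--     l = 0
--     r = 0
--     while r < len(s) and s[r] == ' ':
--         r += 1
--     l = r
--     r = len(s) - 1
--     while r > l and s[r] == ' ':
--         r -= 1
--     return ''.join(s[l: r + 1]), len(s), l, r
-- ===== SOURCE B (Python) =====
-- def remove_spaces_around(s: str):
--     n = len(s)
--     first = last = None
--     for i, c in enumerate(s):
--         if c != ' ':
--             if first is None:
--                 first = i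
--             last = i
--     if first is None:
--         return '', n, n, n - 1
--     return s[first:last + 1], n, first, last
-- ===== Notes on version B (the rewrite author's own statement) =====
-- stated objective: alternative
-- what changed: Replaces A's two opposite-direction index-walking scans (forward over leading spaces, backward over trailing spaces) with a single forward pass over enumerate(s) accumulating the first and last non-space index, deriving the result from those accumulators.
import Mathlib
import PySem

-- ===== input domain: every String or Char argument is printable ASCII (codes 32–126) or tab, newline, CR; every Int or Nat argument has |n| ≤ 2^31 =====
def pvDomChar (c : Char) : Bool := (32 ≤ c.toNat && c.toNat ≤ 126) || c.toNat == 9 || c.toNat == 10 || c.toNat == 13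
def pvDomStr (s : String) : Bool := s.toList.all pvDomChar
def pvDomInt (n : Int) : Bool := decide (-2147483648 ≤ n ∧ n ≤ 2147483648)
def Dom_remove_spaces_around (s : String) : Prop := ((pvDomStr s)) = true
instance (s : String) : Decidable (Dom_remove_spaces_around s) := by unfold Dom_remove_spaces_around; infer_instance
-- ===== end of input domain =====

-- B replaces A's two opposite-direction index scans by ONE forward pass over enumerate(s)
-- accumulating the first and last non-space index (objective: alternative decomposition).

-- ===== PORT A =====
-- first while loop: scan right over leading spaces
def rsaLoop1 (cs : List Char) (r : Nat) : Nat :=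
  if h : r < cs.length then
    if cs[r] = ' ' then rsaLoop1 cs (r + 1) else r
  else r
termination_by cs.length - r

-- second while loop: scan left over trailing spaces while r > l
def rsaLoop2 (cs : List Char) (l r : Int) : Int :=
  if h : l < r ∧ PySem.List.pyGet? cs r = some ' ' then rsaLoop2 cs l (r - 1) else r
termination_by (r - l).toNat
decreasing_by omega

def remove_spaces_around (s : String) : String × Int × Int × Int :=
  let cs := s.toList
  let l : Nat := rsaLoop1 cs 0
  let r : Int := rsaLoop2 cs (l : Int) ((cs.length : Int) - 1)
  (String.ofList (PySem.List.slice cs (some (l : Int)) (some (r + 1))),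
   (cs.length : Int), (l : Int), r)

-- ===== PORT B =====
-- loop body of Source B: update (first, last) at one enumerated character
def rsbStep (st : Option Int × Option Int) (ic : Int × Char) : Option Int × Option Int :=
  if ic.2 ≠ ' ' then ((if st.1 = none then some ic.1 else st.1), some ic.1) else st

def remove_spaces_around_alt (s : String) : String × Int × Int × Int :=
  let cs := s.toList
  let n : Int := cs.length
  let st := (PySem.List.enumerate cs 0).foldl rsbStep (none, none)
  match st.1, st.2 with
  | some f, some l =>
      (String.ofList (PySem.List.slice cs (some f) (some (l + 1))), n, f, l)
  | _, _ => ("", n, n, n - 1)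

-- ===== PRECONDITION & SPEC =====
def Spec_remove_spaces_around (s : String) (out : String × Int × Int × Int) : Prop := out = remove_spaces_around_alt s
instance (s : String) (out : String × Int × Int × Int) : Decidable (Spec_remove_spaces_around s out) := by unfold Spec_remove_spaces_around; infer_instance

-- ===== CLAIM (what is proved, stated in full; the proofs are below) =====
def Claim_equal_remove_spaces_around : Prop := ∀ (s : String), Dom_remove_spaces_around s → Spec_remove_spaces_around s (remove_spaces_around s)

-- ===== LEMMAS AND PROOFS =====

theorem loop1_shift (cs : List Char) (c : Char) (k : Nat) :
    rsaLoop1 (c :: cs) (k + 1) = rsaLoop1 cs k + 1 := by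
  fun_induction rsaLoop1 cs k with
  | case1 k hlt hsp ih =>
      rw [rsaLoop1]
      simp only [List.length_cons, List.getElem_cons_succ]
      rw [dif_pos (by omega), if_pos hsp]
      exact ih
  | case2 k hlt hsp =>
      rw [rsaLoop1]
      simp only [List.length_cons, List.getElem_cons_succ]
      rw [dif_pos (by omega), if_neg hsp]
  | case3 k hge =>
      rw [rsaLoop1]
      rw [dif_neg (by simp only [List.length_cons]; omega)]

theorem loop1_eq (cs : List Char) :
    rsaLoop1 cs 0 = cs.length - (cs.dropWhile (fun c : Char => c == ' ')).length := by
  induction cs with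
  | nil => rw [rsaLoop1]; simp
  | cons c cs ih =>
      rw [rsaLoop1, dif_pos (by simp : 0 < (c :: cs).length)]
      simp only [List.getElem_cons_zero, List.dropWhile_cons]
      by_cases hc : c = ' '
      · have hlen := List.length_dropWhile_le (fun c : Char => c == ' ') cs
        rw [if_pos hc, loop1_shift, ih, hc]
        simp only [beq_self_eq_true, if_true, List.length_cons]
        omega
      · rw [if_neg hc]
        simp [hc]

-- rsaLoop2 only inspects indices ≤ r, so it agrees on a list and any extension of it
theorem loop2_prefix (xs ys : List Char) (l j : Int) (hp : xs <+: ys) (hl : 0 ≤ l) :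
    j < (xs.length : Int) → rsaLoop2 xs l j = rsaLoop2 ys l j := by
  fun_induction rsaLoop2 xs l j with
  | case1 j h ih =>
      intro hj
      obtain ⟨hlj, hget⟩ := h
      obtain ⟨jn, rfl⟩ := Int.eq_ofNat_of_zero_le (by omega : (0 : Int) ≤ j)
      have hjn : jn < xs.length := by exact_mod_cast hj
      have hgy : PySem.List.pyGet? ys (jn : Int) = some ' ' := by
        rw [PySem.List.pyGet?_natCast] at hget ⊢
        obtain ⟨tl, rfl⟩ := hp
        rwa [List.getElem?_append_left hjn]
      rw [show rsaLoop2 ys l ((jn : Nat) : Int) = rsaLoop2 ys l ((jn : Nat) - 1) from by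
        conv_lhs => rw [rsaLoop2]
        rw [dif_pos ⟨hlj, hgy⟩]]
      exact ih (by omega)
  | case2 j h =>
      intro hj
      by_cases hlj : l < j
      · obtain ⟨jn, rfl⟩ := Int.eq_ofNat_of_zero_le (by omega : (0 : Int) ≤ j)
        have hjn : jn < xs.length := by exact_mod_cast hj
        have hy : PySem.List.pyGet? ys (jn : Int) ≠ some ' ' := by
          intro hgy
          apply h
          refine ⟨hlj, ?_⟩
          rw [PySem.List.pyGet?_natCast] at hgy ⊢
          obtain ⟨tl, rfl⟩ := hp
          rwa [List.getElem?_append_left hjn] at hgy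
        conv_rhs => rw [rsaLoop2]
        rw [dif_neg (by rintro ⟨h1, h2⟩; exact hy h2)]
      · conv_rhs => rw [rsaLoop2]
        rw [dif_neg (by rintro ⟨h1, h2⟩; exact hlj h1)]

theorem loop2_trailing (K : Nat) (X : List Char) (l : Int) (h0 : 0 ≤ l)
    (hl : l < (X.length : Int)) :
    rsaLoop2 (X ++ List.replicate K ' ') l ((X.length : Int) + (K : Int) - 1) =
      rsaLoop2 X l ((X.length : Int) - 1) := by
  induction K with
  | zero => simp
  | succ K ih =>
      have hrepl : X ++ List.replicate (K + 1) ' ' =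
          (X ++ List.replicate K ' ') ++ [' '] := by
        rw [List.append_assoc]
        congr 1
        rw [List.replicate_succ']
      set Y := X ++ List.replicate K ' ' with hY
      have hYlen : Y.length = X.length + K := by simp [hY]
      have hidx : (X.length : Int) + ((K + 1 : Nat) : Int) - 1 = ((Y.length : Nat) : Int) := by
        rw [hYlen]; push_cast; ring
      rw [hrepl, hidx]
      have hget : PySem.List.pyGet? (Y ++ [' ']) ((Y.length : Nat) : Int) = some ' ' := by
        rw [PySem.List.pyGet?_natCast]
        simp
      rw [show rsaLoop2 (Y ++ [' ']) l ((Y.length : Nat) : Int) =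
            rsaLoop2 (Y ++ [' ']) l (((Y.length : Nat) : Int) - 1) from by
        conv_lhs => rw [rsaLoop2]
        rw [dif_pos ⟨by omega, hget⟩]]
      rw [← loop2_prefix Y (Y ++ [' ']) l ((Y.length : Int) - 1) ⟨[' '], rfl⟩ h0
        (by omega)]
      have : (Y.length : Int) - 1 = (X.length : Int) + (K : Int) - 1 := by
        rw [hYlen]; push_cast; ring
      rw [this, ih]

-- structural lemmas about rdropWhile
theorem rdropWhile_append_ne (p : Char → Bool) (xs ys : List Char)
    (h : ys.rdropWhile p ≠ []) :
    (xs ++ ys).rdropWhile p = xs ++ ys.rdropWhile p := by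
  have h' : ys.reverse.dropWhile p ≠ [] := by
    intro he
    apply h
    rw [List.rdropWhile, he, List.reverse_nil]
  rw [List.rdropWhile, List.reverse_append, List.dropWhile_append,
    if_neg (by simpa [List.isEmpty_iff] using h'), List.reverse_append,
    List.reverse_reverse, List.rdropWhile]

theorem rdropWhile_cons_eq (p : Char → Bool) (c : Char) (cs : List Char) :
    (c :: cs).rdropWhile p =
      if cs.rdropWhile p = [] then (if p c then [] else [c]) else c :: cs.rdropWhile p := by
  by_cases h : cs.rdropWhile p = []
  · have h' : cs.reverse.dropWhile p = [] := by
      have := congrArg List.reverse h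
      rwa [List.rdropWhile, List.reverse_reverse, List.reverse_nil] at this
    rw [if_pos h]
    have : (c :: cs) = [c] ++ cs := rfl
    rw [this, List.rdropWhile, List.reverse_append, List.dropWhile_append,
      if_pos (by simp [h'])]
    by_cases hc : p c <;> simp [hc]
  · rw [if_neg h]
    exact rdropWhile_append_ne p [c] cs h

-- characterization of Source B's single pass: first and last non-space index
theorem foldB (cs : List Char) (k : Int) (st : Option Int × Option Int) :
    (PySem.List.enumerate cs k).foldl rsbStep st =
    ((if cs.dropWhile (fun c : Char => c == ' ') = [] then st.1
      else if st.1 = none then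
        some (k + ((cs.takeWhile (fun c : Char => c == ' ')).length : Int)) else st.1),
     (if cs.rdropWhile (fun c : Char => c == ' ') = [] then st.2
      else some (k + ((cs.rdropWhile (fun c : Char => c == ' ')).length : Int) - 1))) := by
  induction cs generalizing k st with
  | nil => simp [PySem.List.enumerate]
  | cons c cs ih =>
      rw [PySem.List.enumerate_cons, List.foldl_cons, ih,
        rdropWhile_cons_eq (fun c : Char => c == ' ') c cs]
      have hdr : cs.dropWhile (fun c : Char => c == ' ') = [] ↔
          cs.rdropWhile (fun c : Char => c == ' ') = [] := by
        rw [List.dropWhile_eq_nil_iff, List.rdropWhile_eq_nil_iff]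
      by_cases hr : cs.rdropWhile (fun c : Char => c == ' ') = []
      · have hd := hdr.mpr hr
        by_cases hc : c = ' '
        · have hstep : rsbStep st (k, c) = st := by simp [rsbStep, hc]
          rw [hstep]
          subst hc
          simp [hd, hr]
        · have hstep : rsbStep st (k, c) =
              ((if st.1 = none then some k else st.1), some k) := by
            simp [rsbStep, hc]
          rw [hstep]
          have hq : (c == ' ') = false := by simp [hc]
          by_cases h1 : st.1 = none <;>
            simp [hd, hr, hq, h1]
      · have hd : cs.dropWhile (fun c : Char => c == ' ') ≠ [] := fun h => hr (hdr.mp h)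
        by_cases hc : c = ' '
        · have hstep : rsbStep st (k, c) = st := by simp [rsbStep, hc]
          rw [hstep]
          subst hc
          rw [Prod.mk.injEq]
          constructor
          · simp only [List.dropWhile_cons, List.takeWhile_cons, beq_self_eq_true, if_true,
              if_neg hd]
            by_cases h1 : st.1 = none <;>
              simp only [h1, if_true, if_false, List.length_cons, Option.some.injEq]
            push_cast; ring
          · rw [if_neg hr, if_neg hr,
              if_neg (List.cons_ne_nil ' ' (cs.rdropWhile (fun c : Char => c == ' ')))]
            simp only [List.length_cons, Option.some.injEq]
            push_cast; ring
        · have hstep : rsbStep st (k, c) =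
              ((if st.1 = none then some k else st.1), some k) := by
            simp [rsbStep, hc]
          rw [hstep]
          have hq : (c == ' ') = false := by simp [hc]
          rw [Prod.mk.injEq]
          constructor
          · simp only [List.dropWhile_cons, List.takeWhile_cons, hq, Bool.false_eq_true,
              if_false, if_neg hd, if_neg (List.cons_ne_nil c cs)]
            by_cases h1 : st.1 = none <;> simp [h1]
          · rw [if_neg hr, if_neg hr,
              if_neg (List.cons_ne_nil c (cs.rdropWhile (fun c : Char => c == ' ')))]
            simp only [List.length_cons, Option.some.injEq]
            push_cast; ring

-- A's l equals the first non-space index (count of leading spaces), A's r the last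
-- (or n-1 when only spaces); Source B's accumulators compute the same two indices.
theorem rsa_eq (cs : List Char) :
    remove_spaces_around (String.ofList cs) = remove_spaces_around_alt (String.ofList cs) := by
  unfold remove_spaces_around remove_spaces_around_alt
  simp only [String.toList_ofList]
  rw [foldB]
  set q : Char → Bool := fun c => c == ' ' with hqdef
  set t : List Char := cs.dropWhile q with ht
  have hcs : cs.takeWhile q ++ t = cs := List.takeWhile_append_dropWhile
  set L : Nat := (cs.takeWhile q).length with hL
  have htlen : L + t.length = cs.length := by
    conv_rhs => rw [← hcs]
    rw [List.length_append, hL, congrArg List.length ht.symm]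
  have hl1 : rsaLoop1 cs 0 = L := by
    have := List.length_dropWhile_le q cs
    rw [loop1_eq, ← hqdef, ← ht]
    omega
  by_cases hte : t = []
  · -- all spaces (or empty): first = none, A stops with r = n-1
    have hre : cs.rdropWhile q = [] := by
      rw [List.rdropWhile_eq_nil_iff]
      exact List.dropWhile_eq_nil_iff.mp (ht ▸ hte)
    have hL0 : L = cs.length := by
      rw [hte] at htlen; simpa using htlen
    rw [if_pos (ht ▸ hte), if_pos hre]
    have hstop : rsaLoop2 cs ((rsaLoop1 cs 0 : Nat) : Int) ((cs.length : Int) - 1)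
        = (cs.length : Int) - 1 := by
      rw [rsaLoop2, dif_neg]
      rintro ⟨h1, _⟩
      rw [hl1, hL0] at h1
      omega
    rw [hstop, hl1, hL0]
    have hc1 : (cs.length : Int) - 1 + 1 = ((cs.length : Nat) : Int) := by ring
    rw [hc1, PySem.List.slice_natCast]
    simp
  · -- there is a non-space character
    have hne' : List.dropWhile q cs ≠ [] := ht ▸ hte
    have hhead := List.head_dropWhile_not q hne'
    have hmemt : (List.dropWhile q cs).head hne' ∈ t := by rw [ht]; exact List.head_mem hne'
    set u : List Char := t.rdropWhile q with hu
    have hune : u ≠ [] := by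
      intro he
      have hall : ∀ x ∈ t, q x = true := by
        intro x hxmem
        have hdec : t = t.rdropWhile q ++ t.rtakeWhile q := List.rdropWhile_append_rtakeWhile.symm
        rw [hdec] at hxmem
        rcases List.mem_append.mp hxmem with h | h
        · rw [← hu, he] at h; cases h
        · exact List.mem_rtakeWhile_imp h
      have := hall _ hmemt
      rw [hhead] at this
      exact Bool.false_ne_true this
    have hrt : cs.rdropWhile q = cs.takeWhile q ++ u := by
      conv_lhs => rw [← hcs]
      exact rdropWhile_append_ne q _ t (hu ▸ hune)
    have hre : cs.rdropWhile q ≠ [] := by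
      rw [hrt]
      intro he
      exact hune (List.append_eq_nil_iff.mp he).2
    rw [if_neg (ht ▸ hte), if_neg hre, if_pos rfl]
    set K : Nat := (t.rtakeWhile q).length with hK
    have htu : u ++ t.rtakeWhile q = t := List.rdropWhile_append_rtakeWhile
    have hrtake : t.rtakeWhile q = List.replicate K ' ' := by
      rw [List.eq_replicate_iff]
      refine ⟨rfl, fun b hb => ?_⟩
      have := List.mem_rtakeWhile_imp hb
      rwa [hqdef, beq_iff_eq] at this
    set X : List Char := cs.takeWhile q ++ u with hX
    have hXr : cs.rdropWhile q = X := hrt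
    have hXlen : X.length = L + u.length := by simp [hX, hL]
    have hulen : u.length + K = t.length := by
      conv_rhs => rw [← htu]; simp [hK]
    have hupos : 0 < u.length := List.length_pos_of_ne_nil hune
    have hsplit : cs = X ++ List.replicate K ' ' := by
      rw [hX, List.append_assoc, ← hrtake, htu, hcs]
    have hlast? : u.getLast? ≠ some ' ' := by
      have hnot := List.rdropWhile_last_not q t (hu ▸ hune)
      rw [hu, List.getLast?_eq_some_getLast (hu ▸ hune)]
      intro he
      injection he with he'
      exact hnot (by rw [he']; simp [hqdef])
    have hloop2 : rsaLoop2 cs ((rsaLoop1 cs 0 : Nat) : Int) ((cs.length : Int) - 1)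
        = (X.length : Int) - 1 := by
      rw [hl1]
      have hcl : (cs.length : Int) - 1 = (X.length : Int) + (K : Int) - 1 := by
        rw [hXlen]; push_cast; omega
      rw [hcl]
      conv_lhs => rw [hsplit]
      rw [loop2_trailing K X ((L : Nat) : Int) (by positivity)
        (by rw [hXlen]; push_cast; omega)]
      rw [rsaLoop2, dif_neg]
      rintro ⟨h1, h2⟩
      have hX1 : 1 ≤ X.length := by omega
      have hcast : (X.length : Int) - 1 = ((X.length - 1 : Nat) : Int) := by omega
      rw [hcast, PySem.List.pyGet?_natCast, ← List.getLast?_eq_getElem?] at h2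
      rw [hX, List.getLast?_append_of_ne_nil _ hune] at h2
      exact hlast? h2
    rw [hloop2, hl1]
    have e1 : (0 : Int) + ((cs.takeWhile q).length : Int) = ((L : Nat) : Int) := by
      rw [hL]; ring
    have e2 : (0 : Int) + ((cs.rdropWhile q).length : Int) - 1 = (X.length : Int) - 1 := by
      rw [hXr]; ring
    rw [e1, e2]

-- ===== VERDICT (by name: the statement is the Claim_ definition above) =====
theorem remove_spaces_around_spec : Claim_equal_remove_spaces_around := by
  intro s _
  unfold Spec_remove_spaces_around
  have h := rsa_eq s.toList
  rwa [String.ofList_toList] at h
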